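-- pv_equiv track=rewrite | github.com/kaikim98/Computing-for-data-science | HW4/P7.py | P7
-- ===== SOURCE A (Python) =====
-- def P7(dct):
--     L1 = []
--     L2 = []
--     a = dct.keys()
--     for i in a:
--         L1.append(i)
--     for j in L1:
--         b = dct[j].keys()
--         for m in b:
--             L2.append(m)
--     ans = list(set(L2))
--     for n in L1:
--         for num in ans:
--             if num in dct[n]:
--                continue
--             else:
--                 return False
--                 break
--     return True
-- ===== SOURCE B (Python) =====
-- def P7(dct):
--     vals = iter(dct.values())
--     first = next(vals, None)
--     if first is None:
--         return True
--     ks = set(first.keys())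
--     return all(set(v.keys()) == ks for v in vals)
-- ===== Notes on version B (the rewrite author's own statement) =====
-- stated objective: simpler
-- what changed: Instead of collecting every inner key into a union list and then double-looping to check each inner dict contains every union key, B takes the first inner dict's key set and checks in one pass that every other inner dict's key set equals it.
import Mathlib
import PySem

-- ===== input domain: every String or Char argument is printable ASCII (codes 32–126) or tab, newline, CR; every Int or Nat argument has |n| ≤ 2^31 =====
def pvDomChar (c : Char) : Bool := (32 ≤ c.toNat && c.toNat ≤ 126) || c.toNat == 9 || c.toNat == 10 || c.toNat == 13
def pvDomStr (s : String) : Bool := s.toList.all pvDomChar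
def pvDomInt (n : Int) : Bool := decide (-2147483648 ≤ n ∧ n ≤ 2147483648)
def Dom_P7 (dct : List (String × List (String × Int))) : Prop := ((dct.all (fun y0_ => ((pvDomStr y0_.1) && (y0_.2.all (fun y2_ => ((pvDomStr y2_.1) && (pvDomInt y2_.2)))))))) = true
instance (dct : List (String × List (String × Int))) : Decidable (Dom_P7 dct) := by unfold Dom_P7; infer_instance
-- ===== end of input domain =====

-- B checks, in one pass, that every inner dict's key set equals the first one's,
-- instead of A's union list + nested membership passes (objective: simpler).

-- ===== PORT A =====
def P7 (dct : List (String × List (String × Int))) : Bool :=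
  -- L1 = list of outer keys (append loop)
  let L1 := dct.foldl (fun acc p => acc ++ [p.1]) []
  -- L2 = all inner keys, appended one by one over each dct[j].keys()
  let L2 := L1.foldl (fun acc j =>
    (((PySem.Dict.mk dct).getD j []).map (·.1)).foldl (fun a m => a ++ [m]) acc) []
  -- ans = list(set(L2)); consumed only by membership tests, so set order is immaterial
  let ans := PySem.Set.ofList L2
  -- 'for n in L1: for num in ans: if num in dct[n]: continue else: return False' / 'return True'
  L1.all (fun n => ans.all (fun num =>
    (((PySem.Dict.mk dct).getD n []).map (·.1)).contains num))

-- ===== PORT B =====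
def P7_alt (dct : List (String × List (String × Int))) : Bool :=
  match dct with
  | [] => true
  | (_, v0) :: rest =>
    let ks := PySem.Set.ofList (v0.map (·.1))
    rest.all (fun p => PySem.Set.equal (PySem.Set.ofList (p.2.map (·.1))) ks)

-- ===== PRECONDITION & SPEC =====
-- Pre_ excludes association lists with duplicate outer keys: they are not the encoding of any
-- Python dict (dict construction collapses duplicate keys), so no Python input reaches them;
-- every encoded dict satisfies Pre_.
def Pre_P7 (dct : List (String × List (String × Int))) : Prop := (dct.map (·.1)).Nodup
instance (dct : List (String × List (String × Int))) : Decidable (Pre_P7 dct) := by unfold Pre_P7; infer_instance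
def pvWitness_P7 : (List (String × List (String × Int))) := [("a", [("x", 1)]), ("b", [("x", 2)])]
def Spec_P7 (dct : List (String × List (String × Int))) (out : Bool) : Prop := out = P7_alt dct
instance (dct : List (String × List (String × Int))) (out : Bool) : Decidable (Spec_P7 dct out) := by unfold Spec_P7; infer_instance

-- ===== CLAIM (what is proved, stated in full; the proofs are below) =====
def Claim_equal_P7 : Prop := ∀ (dct : List (String × List (String × Int))), Dom_P7 dct → Pre_P7 dct → Spec_P7 dct (P7 dct)

-- ===== LEMMAS AND PROOFS =====

-- first-match lookup on an association list with Nodup keys returns the paired value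
lemma lookup_eq_of_mem (dct : List (String × List (String × Int)))
    (h : Pre_P7 dct) (p : String × List (String × Int)) (hp : p ∈ dct) :
    (PySem.Dict.mk dct).getD p.1 [] = p.2 := by
  apply PySem.Dict.getD_of_mem_items (d := PySem.Dict.mk dct) (k := p.1) (v := p.2)
  · simpa using hp
  · simpa using h

-- membership in A's union list L2
lemma mem_L2 (dct : List (String × List (String × Int))) (h : Pre_P7 dct) (x : String) :
    (x ∈ (dct.map (·.1)).foldl (fun acc j =>
        (((PySem.Dict.mk dct).getD j []).map (·.1)).foldl (fun a m => a ++ [m]) acc) [])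
      ↔ ∃ q ∈ dct, x ∈ q.2.map (·.1) := by
  have hrw : (fun (acc : List String) j =>
        (((PySem.Dict.mk dct).getD j []).map (·.1)).foldl (fun a m => a ++ [m]) acc)
      = fun acc j => acc ++ ((PySem.Dict.mk dct).getD j []).map (·.1) := by
    funext acc j
    exact PySem.List.foldl_append_singleton _ _
  rw [hrw, PySem.List.foldl_append_eq_flatMap]
  simp only [List.nil_append, List.mem_flatMap, List.mem_map]
  constructor
  · rintro ⟨j, ⟨p, hp, rfl⟩, hx⟩
    exact ⟨p, hp, by rwa [lookup_eq_of_mem dct h p hp] at hx⟩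
  · rintro ⟨q, hq, hx⟩
    exact ⟨q.1, ⟨q, hq, rfl⟩, by rwa [lookup_eq_of_mem dct h q hq]⟩

lemma P7_iff (dct : List (String × List (String × Int))) (h : Pre_P7 dct) :
    P7 dct = true ↔
      ∀ p ∈ dct, ∀ x, (∃ q ∈ dct, x ∈ q.2.map (·.1)) → x ∈ p.2.map (·.1) := by
  unfold P7
  rw [PySem.List.foldl_append_singleton_eq_map]
  simp only [List.nil_append, List.all_eq_true, List.contains_iff_mem]
  constructor
  · intro H p hp x hxU
    have hx2 := (PySem.Set.mem_ofList _ _).mpr ((mem_L2 dct h x).mpr hxU)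
    have := H p.1 (List.mem_map_of_mem hp) x hx2
    rwa [lookup_eq_of_mem dct h p hp] at this
  · intro H n hn num hnum
    obtain ⟨p, hp, rfl⟩ := List.mem_map.mp hn
    rw [lookup_eq_of_mem dct h p hp]
    exact H p hp num ((mem_L2 dct h num).mp ((PySem.Set.mem_ofList _ _).mp hnum))

lemma P7_alt_iff (dct : List (String × List (String × Int))) :
    P7_alt dct = true ↔
      ∀ p ∈ dct, ∀ x, (∃ q ∈ dct, x ∈ q.2.map (·.1)) → x ∈ p.2.map (·.1) := by
  match dct with
  | [] => simp [P7_alt]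
  | (k0, v0) :: rest =>
    simp only [P7_alt, List.all_eq_true]
    have hmem : ∀ p ∈ rest,
        (PySem.Set.equal (PySem.Set.ofList (p.2.map (·.1))) (PySem.Set.ofList (v0.map (·.1))) = true)
          ↔ ∀ x, x ∈ p.2.map (·.1) ↔ x ∈ v0.map (·.1) := by
      intro p _
      rw [PySem.Set.equal_iff]
      constructor
      · intro H x
        simpa [PySem.Set.mem_ofList] using H x
      · intro H x
        simpa [PySem.Set.mem_ofList] using H x
    constructor
    · intro H p hp x ⟨q, hq, hxq⟩
      have hx0 : x ∈ v0.map (·.1) := by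
        rcases List.mem_cons.mp hq with h0 | hq'
        · rw [h0] at hxq; exact hxq
        · exact ((hmem q hq').mp (H q hq') x).mp hxq
      rcases List.mem_cons.mp hp with h0 | hp'
      · rw [h0]; exact hx0
      · exact ((hmem p hp').mp (H p hp') x).mpr hx0
    · intro H p hp
      refine (hmem p hp).mpr ?_
      intro x
      constructor
      · intro hx
        exact H (k0, v0) (List.mem_cons_self) x ⟨p, List.mem_cons_of_mem _ hp, hx⟩
      · intro hx
        exact H p (List.mem_cons_of_mem _ hp) x ⟨(k0, v0), List.mem_cons_self, hx⟩

-- ===== VERDICT (by name: the statement is the Claim_ definition above) =====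
theorem P7_spec : Claim_equal_P7 := by
  intro dct _ hpre
  unfold Spec_P7
  rw [Bool.eq_iff_iff, P7_iff dct hpre, P7_alt_iff dct]
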